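-- pv_equiv track=rewrite | github.com/jc7k/nl-fhir | src/nl_fhir/services/llm_enhancer.py | _add_contextual_enhancement
-- ===== SOURCE A (Python) =====
-- def _add_contextual_enhancement(summary: str) -> str:
--     """Add clinical context to summary"""
--     enhanced_lines = []
--
--     for line in summary.split('\n'):
--         enhanced_lines.append(line)
--
--         # Add context for medications
--         if "Medication order:" in line and "Metformin" in line:
--             enhanced_lines.append("  • This medication helps control blood sugar by improving insulin sensitivity and reducing glucose production.")
--         elif "Medication order:" in line and "Warfarin" in line:
--             enhanced_lines.append("  • Blood thinner requiring regular monitoring of clotting times (INR).")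
--         elif "Medication order:" in line and "Insulin" in line:
--             enhanced_lines.append("  • Hormone replacement for diabetes management - monitor blood glucose closely.")
--
--         # Add context for observations
--         elif "Observation:" in line and "High" in line:
--             enhanced_lines.append("  • Abnormal result requiring clinical attention and possible intervention.")
--         elif "Observation:" in line and "blood pressure" in line.lower():
--             enhanced_lines.append("  • Important cardiovascular indicator for monitoring heart health.")
--
--     return '\n'.join(enhanced_lines)
-- ===== SOURCE B (Python) =====
-- MED_NOTES = [
--     ("Metformin", "  \u2022 This medication helps control blood sugar by improving insulin sensitivity and reducing glucose production."),
--     ("Warfarin", "  \u2022 Blood thinner requiring regular monitoring of clotting times (INR)."),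
--     ("Insulin", "  \u2022 Hormone replacement for diabetes management - monitor blood glucose closely."),
-- ]
--
-- def _context(line):
--     if "Medication order:" in line:
--         for drug, text in MED_NOTES:
--             if drug in line:
--                 return text
--     if "Observation:" in line:
--         if "High" in line:
--             return "  \u2022 Abnormal result requiring clinical attention and possible intervention."
--         if "blood pressure" in line.lower():
--             return "  \u2022 Important cardiovascular indicator for monitoring heart health."
--     return None
--
-- def _add_contextual_enhancement(summary: str) -> str:
--     lines = summary.split('\n')
--     # pass 1: collect the insertion points (line index -> context note)
--     insertions = [(i, note) for i, line in enumerate(lines)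
--                   if (note := _context(line)) is not None]
--     # pass 2: splice the notes in back-to-front so earlier indices stay valid
--     for i, note in reversed(insertions):
--         lines.insert(i + 1, note)
--     return '\n'.join(lines)
-- ===== Notes on version B (the rewrite author's own statement) =====
-- stated objective: alternative
-- what changed: B runs two staged passes: it first collects (line-index, note) insertion points via a helper that nests a drug table under a single medication-order check, then splices the notes into the line list back-to-front with list.insert, instead of A's single pass appending through an inline if/elif chain.
import Mathlib
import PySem

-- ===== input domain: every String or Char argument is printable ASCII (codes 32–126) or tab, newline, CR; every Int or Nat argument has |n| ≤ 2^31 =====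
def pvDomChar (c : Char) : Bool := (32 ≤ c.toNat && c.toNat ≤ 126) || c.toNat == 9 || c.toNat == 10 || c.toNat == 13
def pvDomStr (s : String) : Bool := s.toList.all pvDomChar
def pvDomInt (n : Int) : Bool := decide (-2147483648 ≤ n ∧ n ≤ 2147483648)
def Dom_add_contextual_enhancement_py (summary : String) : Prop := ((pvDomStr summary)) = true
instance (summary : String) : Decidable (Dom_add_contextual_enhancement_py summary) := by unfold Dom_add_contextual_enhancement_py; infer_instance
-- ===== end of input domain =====

-- B collects (line-index, note) insertion points in one pass, then splices them in back-to-front with list.insert; A appends through an inline if/elif chain in a single pass. Same values, different structure.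

-- ===== PORT A =====
-- one iteration of A's loop: append the line, then the if/elif chain appends at most one context line
def actxA_step (acc : List String) (line : String) : List String :=
  let acc := acc ++ [line]
  if PySem.Str.isIn "Medication order:" line && PySem.Str.isIn "Metformin" line then
    acc ++ ["  • This medication helps control blood sugar by improving insulin sensitivity and reducing glucose production."]
  else if PySem.Str.isIn "Medication order:" line && PySem.Str.isIn "Warfarin" line then
    acc ++ ["  • Blood thinner requiring regular monitoring of clotting times (INR)."]
  else if PySem.Str.isIn "Medication order:" line && PySem.Str.isIn "Insulin" line then
    acc ++ ["  • Hormone replacement for diabetes management - monitor blood glucose closely."]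
  else if PySem.Str.isIn "Observation:" line && PySem.Str.isIn "High" line then
    acc ++ ["  • Abnormal result requiring clinical attention and possible intervention."]
  else if PySem.Str.isIn "Observation:" line && PySem.Str.isIn "blood pressure" (PySem.Str.lower line) then
    acc ++ ["  • Important cardiovascular indicator for monitoring heart health."]
  else acc

def add_contextual_enhancement_py (summary : String) : String :=
  PySem.Str.join "\n" (((PySem.Str.split? summary "\n").getD []).foldl actxA_step [])

-- ===== PORT B =====
-- MED_NOTES: the drug table scanned only when the line is a medication order
def actxMedNotes : List (String × String) :=
  [ ("Metformin", "  • This medication helps control blood sugar by improving insulin sensitivity and reducing glucose production."),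
    ("Warfarin", "  • Blood thinner requiring regular monitoring of clotting times (INR)."),
    ("Insulin", "  • Hormone replacement for diabetes management - monitor blood glucose closely.") ]

-- _context: first drug note on a medication-order line, else the observation notes, else None
def actxContext (line : String) : Option String :=
  match (if PySem.Str.isIn "Medication order:" line
         then actxMedNotes.find? (fun p => PySem.Str.isIn p.1 line)
         else none) with
  | some p => some p.2
  | none =>
    if PySem.Str.isIn "Observation:" line then
      if PySem.Str.isIn "High" line then
        some "  • Abnormal result requiring clinical attention and possible intervention."
      else if PySem.Str.isIn "blood pressure" (PySem.Str.lower line) then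
        some "  • Important cardiovascular indicator for monitoring heart health."
      else none
    else none

def add_contextual_enhancement_py_alt (summary : String) : String :=
  let lines := (PySem.Str.split? summary "\n").getD []
  -- pass 1: collect the insertion points
  let insertions := (PySem.List.enumerate lines).filterMap
    (fun p => (actxContext p.2).map (fun note => (p.1, note)))
  -- pass 2: splice back-to-front ('for i, note in reversed(insertions): lines.insert(i+1, note)')
  let lines2 := insertions.reverse.foldl (fun acc p => PySem.List.insert acc (p.1 + 1) p.2) lines
  PySem.Str.join "\n" lines2

-- ===== PRECONDITION & SPEC =====
def Spec_add_contextual_enhancement_py (summary : String) (out : String) : Prop := out = add_contextual_enhancement_py_alt summary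
instance (summary : String) (out : String) : Decidable (Spec_add_contextual_enhancement_py summary out) := by unfold Spec_add_contextual_enhancement_py; infer_instance

-- ===== CLAIM (what is proved, stated in full; the proofs are below) =====
def Claim_equal_add_contextual_enhancement_py : Prop := ∀ (summary : String), Dom_add_contextual_enhancement_py summary → Spec_add_contextual_enhancement_py summary (add_contextual_enhancement_py summary)

-- ===== LEMMAS AND PROOFS =====

-- the lines A's chain appends after a line = B's _context as a 0/1-element list
def actxNote (line : String) : List String := (actxContext line).toList

theorem actxA_step_eq (acc : List String) (line : String) :
    actxA_step acc line = acc ++ line :: actxNote line := by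
  cases hm : PySem.Str.isIn "Medication order:" line <;>
  cases h1 : PySem.Str.isIn "Metformin" line <;>
  cases h2 : PySem.Str.isIn "Warfarin" line <;>
  cases h3 : PySem.Str.isIn "Insulin" line <;>
  cases ho : PySem.Str.isIn "Observation:" line <;>
  cases h4 : PySem.Str.isIn "High" line <;>
  cases h5 : PySem.Str.isIn "blood pressure" (PySem.Str.lower line) <;>
  simp only [actxA_step, actxNote, actxContext, actxMedNotes, List.find?, hm, h1, h2, h3, ho, h4, h5,
    Bool.true_and, Bool.false_and, if_true, if_false, Option.toList_some, Option.toList_none,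
    List.append_assoc, List.singleton_append, Bool.false_eq_true]

-- A's whole fold equals the flatMap that interleaves each line with its note
theorem actx_foldl_eq (ls : List String) (acc : List String) :
    ls.foldl actxA_step acc = acc ++ ls.flatMap (fun line => line :: actxNote line) := by
  induction ls generalizing acc with
  | nil => simp
  | cons l t ih => simp [List.foldl, actxA_step_eq, ih, List.flatMap_cons]

-- B's back-to-front splicing, generalized: applying the insertions computed for 'ls'
-- starting at index k to 'pre ++ ls' (with pre of length k) interleaves the notes into ls.
theorem actx_insert_eq (ls pre : List String) (k : Nat) (hk : pre.length = k) :
    (((PySem.List.enumerate ls (Int.ofNat k)).filterMap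
        (fun p => (actxContext p.2).map (fun note => (p.1, note)))).reverse.foldl
      (fun acc p => PySem.List.insert acc (p.1 + 1) p.2) (pre ++ ls))
      = pre ++ ls.flatMap (fun line => line :: actxNote line) := by
  induction ls generalizing pre k with
  | nil => simp
  | cons l t ih =>
    have hstep := ih (pre ++ [l]) (k + 1) (by simp [hk])
    rcases hc : actxContext l with _ | note
    · -- no note on this line: no insertion for it
      simp only [PySem.List.enumerate_cons, List.filterMap_cons, hc, Option.map_none]
      have hca : (Int.ofNat k) + 1 = Int.ofNat (k + 1) := by simp
      simp only [hca]
      simpa [actxNote, hc, List.flatMap_cons] using hstep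
    · -- a note: its insertion is applied LAST (reverse order), at position k+1 = |pre ++ [l]|
      simp only [PySem.List.enumerate_cons, List.filterMap_cons, hc, Option.map_some,
        List.reverse_cons, List.foldl_append, List.foldl_cons, List.foldl_nil]
      have hca : (Int.ofNat k) + 1 = Int.ofNat (k + 1) := by simp
      simp only [hca]
      rw [(by simpa using hstep :
        ((PySem.List.enumerate t (Int.ofNat (k + 1))).filterMap
          (fun p => (actxContext p.2).map (fun note => (p.1, note)))).reverse.foldl
          (fun acc p => PySem.List.insert acc (p.1 + 1) p.2) (pre ++ l :: t)
          = pre ++ [l] ++ t.flatMap (fun line => line :: actxNote line))]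
      have hins := PySem.List.insert_natCast
        (pre ++ [l] ++ t.flatMap (fun line => line :: actxNote line)) (k + 1) note
        (by simp [hk])
      rw [(by simp : ((Int.ofNat (k + 1)) : Int) = ((k + 1 : Nat) : Int)), hins]
      have htake : (pre ++ [l] ++ t.flatMap (fun line => line :: actxNote line)).take (k + 1) = pre ++ [l] := by
        rw [List.take_append_of_le_length (by simp [hk])]
        simp [hk]
      have hdrop : (pre ++ [l] ++ t.flatMap (fun line => line :: actxNote line)).drop (k + 1) = t.flatMap (fun line => line :: actxNote line) := by
        rw [List.drop_append_of_le_length (by simp [hk])]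
        simp [hk]
      rw [htake, hdrop]
      simp [actxNote, hc, List.flatMap_cons]

-- ===== VERDICT (by name: the statement is the Claim_ definition above) =====
theorem add_contextual_enhancement_py_spec : Claim_equal_add_contextual_enhancement_py := by
  intro summary _
  unfold Spec_add_contextual_enhancement_py add_contextual_enhancement_py add_contextual_enhancement_py_alt
  rw [actx_foldl_eq, List.nil_append]
  have h0 := actx_insert_eq ((PySem.Str.split? summary "\n").getD []) [] 0 rfl
  simp only [List.nil_append] at h0
  rw [← h0]
  rfl
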